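-- pv_equiv track=rewrite | github.com/danieldeutsch/sacrerouge | sacrerouge/metrics/pyreval.py | _index_summaries
-- ===== SOURCE A (Python) =====
-- from typing import Dict, List, Tuple
--
-- def _index_summaries(
--                      summaries_list: List[List[str]],
--                      references_list: List[List[str]]) -> Tuple[List[str], Dict[str, int]]:
--     index_to_summary = []
--     summary_to_index = {}
--     for summs_list in [summaries_list, references_list]:
--         for summaries in summs_list:
--             for summary in summaries:
--                 if summary not in summary_to_index:
--                     index_to_summary.append(summary)
--                     summary_to_index[summary] = len(summary_to_index)
--     return index_to_summary, summary_to_index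
-- ===== SOURCE B (Python) =====
-- from typing import Dict, List, Tuple
--
-- def _index_summaries(
--                      summaries_list: List[List[str]],
--                      references_list: List[List[str]]) -> Tuple[List[str], Dict[str, int]]:
--     flat = [s for group in summaries_list for s in group] + \
--            [s for group in references_list for s in group]
--     # Scan backwards so the surviving value for each string is its FIRST position.
--     first = {}
--     for i, s in reversed(list(enumerate(flat))):
--         first[s] = i
--     # The unique strings ordered by first occurrence = sort by that position.
--     index_to_summary = sorted(first, key=first.get)
--     summary_to_index = {s: i for i, s in enumerate(index_to_summary)}
--     return index_to_summary, summary_to_index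
-- ===== Notes on version B (the rewrite author's own statement) =====
-- stated objective: alternative
-- what changed: Replaces A's single forward pass with a seen-dict membership branch by a sort-based algorithm: a backward scan over the flattened list records each string's first-occurrence position, the unique strings are sorted by that position, and the index dict is built in a separate enumerate pass.
import Mathlib
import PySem

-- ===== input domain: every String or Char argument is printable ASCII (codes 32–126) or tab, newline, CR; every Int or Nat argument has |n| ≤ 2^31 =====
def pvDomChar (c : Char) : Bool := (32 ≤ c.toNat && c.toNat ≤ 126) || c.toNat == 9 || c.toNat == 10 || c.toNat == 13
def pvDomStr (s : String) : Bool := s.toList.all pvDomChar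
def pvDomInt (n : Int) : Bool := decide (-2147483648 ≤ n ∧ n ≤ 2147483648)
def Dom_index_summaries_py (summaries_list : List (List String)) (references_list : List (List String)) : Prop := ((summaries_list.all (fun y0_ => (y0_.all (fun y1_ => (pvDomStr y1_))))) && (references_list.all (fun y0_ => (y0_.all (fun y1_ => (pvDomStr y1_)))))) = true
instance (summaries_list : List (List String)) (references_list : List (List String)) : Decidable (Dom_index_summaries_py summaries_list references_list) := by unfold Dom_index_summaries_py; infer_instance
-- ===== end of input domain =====

-- B replaces A's incremental seen-dict loop by a sort-based algorithm: a backward scan records each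
-- string's first position, the unique strings are sorted by that position, and the index dict is
-- built in a final enumerate pass; same result, genuinely different (sort-based) algorithm.

-- ===== PORT A =====
-- Nested loops growing the index list and the index dict in lockstep (literal port of A).
def pvAStep (st : List String × PySem.Dict String Int) (summary : String) :
    List String × PySem.Dict String Int :=
  if st.2.contains summary then st
  else (st.1 ++ [summary], st.2.insert summary (st.2.size : Int))

def index_summaries_py (summaries_list : List (List String)) (references_list : List (List String)) : List String × (List (String × Int)) :=
  let st := [summaries_list, references_list].foldl
    (fun st summs_list => summs_list.foldl
      (fun st summaries => summaries.foldl pvAStep st) st)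
    ([], PySem.Dict.empty)
  (st.1, st.2.items)

-- ===== PORT B =====
-- 'for i, s in reversed(list(enumerate(flat))): first[s] = i' (enumerate pairs in reverse order)
def pvFirstD (flat : List String) : PySem.Dict String Int :=
  (PySem.List.enumerate flat 0).reverse.foldl (fun d p => d.insert p.2 p.1) PySem.Dict.empty

-- '{summary: i for i, summary in enumerate(index_to_summary)}' (distinct keys: the assoc list is the dict)
def pvEmap (l : List String) : List (String × Int) :=
  (PySem.List.enumerate l 0).map (fun p => (p.2, p.1))

-- B: flatten; backward scan for first positions; sort the dict's keys by first position; enumerate.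
def index_summaries_py_alt (summaries_list : List (List String)) (references_list : List (List String)) : List String × (List (String × Int)) :=
  let flat := summaries_list.flatMap (fun g => g) ++ references_list.flatMap (fun g => g)
  let first := pvFirstD flat
  let index_to_summary := PySem.List.sorted first.keys (fun s => first.getD s 0) false
  (index_to_summary, pvEmap index_to_summary)

-- ===== PRECONDITION & SPEC =====
def Spec_index_summaries_py (summaries_list : List (List String)) (references_list : List (List String)) (out : List String × (List (String × Int))) : Prop := out = index_summaries_py_alt summaries_list references_list
instance (summaries_list : List (List String)) (references_list : List (List String)) (out : List String × (List (String × Int))) : Decidable (Spec_index_summaries_py summaries_list references_list out) := by unfold Spec_index_summaries_py; infer_instance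

-- ===== CLAIM (what is proved, stated in full; the proofs are below) =====
def Claim_equal_index_summaries_py : Prop := ∀ (summaries_list : List (List String)) (references_list : List (List String)), Dom_index_summaries_py summaries_list references_list → Spec_index_summaries_py summaries_list references_list (index_summaries_py summaries_list references_list)

-- ===== LEMMAS AND PROOFS =====

-- ---- A equals (dedup flat, pvEmap (dedup flat)) ----

lemma emap_gen (l : List String) : ∀ (s : Int) (x : String),
    (((PySem.List.enumerate l s).map (fun p => (p.2, p.1))).any (fun p => p.1 == x)) = l.contains x := by
  induction l with
  | nil => intro s x; rfl
  | cons y t ih =>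
    intro s x
    simp only [PySem.List.enumerate_cons, List.map_cons, List.any_cons]
    rw [ih, List.contains_cons, BEq.comm]

lemma contains_emap (l : List String) (x : String) :
    (PySem.Dict.mk (pvEmap l)).contains x = l.contains x := by
  simp only [PySem.Dict.contains, pvEmap]
  exact emap_gen l 0 x

lemma emap_append_singleton (l : List String) (x : String) :
    pvEmap (l ++ [x]) = pvEmap l ++ [(x, (l.length : Int))] := by
  simp [pvEmap, PySem.List.enumerate_append, PySem.List.enumerate_cons]

lemma step_emap (l : List String) (x : String) :
    pvAStep (l, PySem.Dict.mk (pvEmap l)) x =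
      (PySem.Set.add l x, PySem.Dict.mk (pvEmap (PySem.Set.add l x))) := by
  simp only [pvAStep, contains_emap, PySem.Set.add, PySem.Set.contains]
  by_cases h : x ∈ l
  · simp [h]
  · simp only [List.contains_eq_mem, h, decide_false, Bool.false_eq_true, if_false]
    simp only [PySem.Dict.insert, contains_emap, List.contains_eq_mem, h, decide_false,
      Bool.false_eq_true, if_false]
    rw [emap_append_singleton]
    simp [PySem.Dict.size, pvEmap, PySem.List.length_enumerate]

lemma fold_step (xs : List String) : ∀ l : List String,
    xs.foldl pvAStep (l, PySem.Dict.mk (pvEmap l)) =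
      (xs.foldl PySem.Set.add l, PySem.Dict.mk (pvEmap (xs.foldl PySem.Set.add l))) := by
  induction xs with
  | nil => intro l; rfl
  | cons x t ih =>
    intro l
    simp only [List.foldl_cons, step_emap, ih]

lemma fold_flat (gs : List (List String)) : ∀ (st : List String × PySem.Dict String Int),
    gs.foldl (fun st summaries => summaries.foldl pvAStep st) st =
      (gs.flatMap (fun summaries => summaries)).foldl pvAStep st := by
  induction gs with
  | nil => intro st; rfl
  | cons g t ih =>
    intro st
    simp only [List.foldl_cons, List.flatMap_cons, List.foldl_append, ih]

lemma a_eq_dedup (S R : List (List String)) :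
    index_summaries_py S R =
      (PySem.List.dedup ((S ++ R).flatMap (fun g => g)),
       pvEmap (PySem.List.dedup ((S ++ R).flatMap (fun g => g)))) := by
  have hempty : (PySem.Dict.empty : PySem.Dict String Int) = PySem.Dict.mk (pvEmap []) := rfl
  simp only [index_summaries_py, List.foldl_cons, List.foldl_nil,
    fold_flat, hempty, ← List.foldl_append, ← List.flatMap_append, fold_step]
  rfl

-- ---- B's sorted list equals dedup flat ----

lemma firstD_cons (x : String) (xs : List String) (s : Int) :
    (PySem.List.enumerate (x :: xs) s).reverse.foldl (fun d p => d.insert p.2 p.1) PySem.Dict.empty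
      = ((PySem.List.enumerate xs (s + 1)).reverse.foldl (fun d p => d.insert p.2 p.1)
          PySem.Dict.empty).insert x s := by
  simp [PySem.List.enumerate_cons, List.foldl_append]

lemma firstD_get? (l : List String) : ∀ (s : Int) (v : String),
    ((PySem.List.enumerate l s).reverse.foldl (fun d p => d.insert p.2 p.1)
        PySem.Dict.empty).get? v
      = (PySem.List.index? l v).map (fun k => s + (k : Int)) := by
  induction l with
  | nil => intro s v; rfl
  | cons x xs ih =>
    intro s v
    rw [firstD_cons]
    by_cases h : v = x
    · subst h
      rw [PySem.Dict.get?_insert_self, PySem.List.index?_cons_self]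
      simp
    · rw [PySem.Dict.get?_insert_of_ne _ _ h, ih,
        PySem.List.index?_cons_of_ne xs (fun he => h he.symm)]
      cases PySem.List.index? xs v with
      | none => rfl
      | some k => simp; ring

lemma firstD_keys (l : List String) :
    (pvFirstD l).keys = PySem.Set.ofList l.reverse := by
  unfold pvFirstD
  rw [PySem.Dict.keys_foldl_insert_key ((PySem.List.enumerate l 0).reverse)
    (fun p => p.2) (fun d p => p.1) PySem.Dict.empty]
  rw [List.map_reverse, PySem.List.map_snd_enumerate]
  simp [PySem.Set.update_nil_left]

-- first-occurrence index (as a Nat) used only inside the proofs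
def pvFIdx (l : List String) (v : String) : Nat := (PySem.List.index? l v).getD 0

lemma fidx_append_of_mem (l t : List String) (v : String) (h : v ∈ l) :
    pvFIdx (l ++ t) v = pvFIdx l v := by
  unfold pvFIdx
  rw [PySem.List.index?_append_of_mem t h]

lemma fidx_lt_length (l : List String) (v : String) (h : v ∈ l) :
    pvFIdx l v < l.length := by
  rcases (PySem.List.index?_isSome_iff l v).mpr h with h'
  rcases Option.isSome_iff_exists.mp h' with ⟨k, hk⟩
  rcases PySem.List.getElem_of_index?_eq_some hk with ⟨hlt, _, _⟩
  unfold pvFIdx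
  rw [hk]
  exact hlt

lemma fidx_append_singleton_self (l : List String) (x : String) (h : x ∉ l) :
    pvFIdx (l ++ [x]) x = l.length := by
  unfold pvFIdx
  rw [PySem.List.index?_append_singleton_self l x h]
  rfl

lemma pairwise_fidx (l : List String) :
    (PySem.Set.ofList l).Pairwise (fun a b => pvFIdx l a < pvFIdx l b) := by
  induction l using List.reverseRecOn with
  | nil => simp
  | append_singleton xs x ih =>
    by_cases h : x ∈ xs
    · rw [PySem.Set.ofList_append_singleton, PySem.Set.add_of_mem ((PySem.Set.mem_ofList xs x).mpr h)]
      refine ih.imp_of_mem ?_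
      intro a b ha hb hab
      have ha' : a ∈ xs := (PySem.Set.mem_ofList xs a).mp ha
      have hb' : b ∈ xs := (PySem.Set.mem_ofList xs b).mp hb
      rwa [fidx_append_of_mem xs [x] a ha', fidx_append_of_mem xs [x] b hb']
    · rw [PySem.Set.ofList_append_singleton, PySem.Set.add_of_not_mem (fun hm => h ((PySem.Set.mem_ofList xs x).mp hm))]
      rw [List.pairwise_append]
      refine ⟨ih.imp_of_mem ?_, by simp, ?_⟩
      · intro a b ha hb hab
        have ha' : a ∈ xs := (PySem.Set.mem_ofList xs a).mp ha
        have hb' : b ∈ xs := (PySem.Set.mem_ofList xs b).mp hb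
        rwa [fidx_append_of_mem xs [x] a ha', fidx_append_of_mem xs [x] b hb']
      · intro a ha b hb
        have ha' : a ∈ xs := (PySem.Set.mem_ofList xs a).mp ha
        have hb' : b = x := by simpa using hb
        subst hb'
        rw [fidx_append_of_mem xs [b] a ha', fidx_append_singleton_self xs b h]
        exact fidx_lt_length xs a ha'

lemma firstD_getD (l : List String) (v : String) (h : v ∈ l) :
    (pvFirstD l).getD v 0 = (pvFIdx l v : Int) := by
  rcases Option.isSome_iff_exists.mp ((PySem.List.index?_isSome_iff l v).mpr h) with ⟨k, hk⟩
  rw [PySem.Dict.getD_eq_get?_getD]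
  unfold pvFirstD
  rw [firstD_get? l 0 v, hk]
  unfold pvFIdx
  rw [hk]
  simp

lemma b_sorted_eq_dedup (flat : List String) :
    PySem.List.sorted (pvFirstD flat).keys (fun s => (pvFirstD flat).getD s 0) false
      = PySem.List.dedup flat := by
  rw [PySem.List.dedup_eq_ofList]
  apply PySem.List.sorted_eq_of_perm_of_pairwise_lt
  · rw [firstD_keys]
    apply (List.perm_ext_iff_of_nodup (PySem.Set.nodup_ofList flat)
      (PySem.Set.nodup_ofList flat.reverse)).mpr
    intro a
    simp [PySem.Set.mem_ofList]
  · refine (pairwise_fidx flat).imp_of_mem ?_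
    intro a b ha hb hab
    have ha' : a ∈ flat := (PySem.Set.mem_ofList flat a).mp ha
    have hb' : b ∈ flat := (PySem.Set.mem_ofList flat b).mp hb
    rw [firstD_getD flat a ha', firstD_getD flat b hb']
    exact_mod_cast hab

-- ===== VERDICT (by name: the statement is the Claim_ definition above) =====
theorem index_summaries_py_spec : Claim_equal_index_summaries_py := by
  intro S R _
  simp only [Spec_index_summaries_py]
  rw [a_eq_dedup]
  simp only [index_summaries_py_alt]
  rw [b_sorted_eq_dedup]
  simp [List.flatMap_append]
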